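-- pv_equiv track=rewrite | github.com/keurcien/auxilia | backend/app/agents/runtime.py | _resolve_server_name_from_prefixed_tool_name
-- ===== SOURCE A (Python) =====
-- def _resolve_server_name_from_prefixed_tool_name(
--     prefixed_tool_name: str,
--     server_names: list[str],
-- ) -> str | None:
--     for server_name in sorted(server_names, key=len, reverse=True):
--         if prefixed_tool_name == server_name:
--             return server_name
--         if prefixed_tool_name.startswith(f"{server_name}_"):
--             return server_name
--     return None
-- ===== SOURCE B (Python) =====
-- def _resolve_server_name_from_prefixed_tool_name(
--     prefixed_tool_name: str,
--     server_names: list[str],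
-- ) -> str | None:
--     best = None
--     for name in server_names:
--         if (prefixed_tool_name == name
--                 or prefixed_tool_name.startswith(name + "_")) \
--                 and (best is None or len(name) > len(best)):
--             best = name
--     return best
-- ===== Notes on version B (the rewrite author's own statement) =====
-- stated objective: faster
-- what changed: Replaced sort-by-length-descending then first-match scan with a single linear pass that keeps the longest matching name seen so far (strict > keeps the earliest among equal lengths, matching the stable sort).
import Mathlib
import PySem

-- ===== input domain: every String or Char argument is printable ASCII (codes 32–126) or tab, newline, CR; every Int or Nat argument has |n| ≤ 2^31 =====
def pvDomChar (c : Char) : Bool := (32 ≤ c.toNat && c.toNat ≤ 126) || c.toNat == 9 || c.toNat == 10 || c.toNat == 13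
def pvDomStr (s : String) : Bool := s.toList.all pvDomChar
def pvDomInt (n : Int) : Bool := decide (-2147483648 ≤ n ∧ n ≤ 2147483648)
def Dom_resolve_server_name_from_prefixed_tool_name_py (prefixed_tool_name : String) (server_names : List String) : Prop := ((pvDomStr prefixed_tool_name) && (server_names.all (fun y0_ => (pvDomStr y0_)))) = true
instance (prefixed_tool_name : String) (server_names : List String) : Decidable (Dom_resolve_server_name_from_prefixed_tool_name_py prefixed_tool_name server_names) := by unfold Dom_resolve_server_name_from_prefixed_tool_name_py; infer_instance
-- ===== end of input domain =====

-- B replaces A's sort-by-length-descending + first-match scan by one linear pass keeping the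
-- longest matching name (objective: faster, O(n) vs the sort).

-- ===== PORT A =====
-- the for-loop over the sorted list, with the two if-returns in A's order
def pvLoopA (p : String) : List String → Option String
  | [] => none
  | s :: rest =>
      if p == s then some s
      else if PySem.Chars.startswith p.toList (s.toList ++ ['_']) then some s
        -- f"{server_name}_" ported as s.toList ++ ['_'] on code points (exact)
      else pvLoopA p rest

def resolve_server_name_from_prefixed_tool_name_py (prefixed_tool_name : String) (server_names : List String) : Option String :=
  pvLoopA prefixed_tool_name (PySem.List.sorted server_names (fun s => PySem.Str.len s) true)

-- ===== PORT B =====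
-- one step of Source B's loop body: record name if it matches and is strictly longer than best
def pvBestStep (p : String) (best : Option String) (name : String) : Option String :=
  if (p == name || PySem.Chars.startswith p.toList (name.toList ++ ['_']))
      && (match best with
          | none => true
          | some b => decide (PySem.Str.len b < PySem.Str.len name)) then
    some name
  else best

def resolve_server_name_from_prefixed_tool_name_py_alt (prefixed_tool_name : String) (server_names : List String) : Option String :=
  server_names.foldl (pvBestStep prefixed_tool_name) none

-- ===== PRECONDITION & SPEC =====
def Spec_resolve_server_name_from_prefixed_tool_name_py (prefixed_tool_name : String) (server_names : List String) (out : Option String) : Prop := out = resolve_server_name_from_prefixed_tool_name_py_alt prefixed_tool_name server_names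
instance (prefixed_tool_name : String) (server_names : List String) (out : Option String) : Decidable (Spec_resolve_server_name_from_prefixed_tool_name_py prefixed_tool_name server_names out) := by unfold Spec_resolve_server_name_from_prefixed_tool_name_py; infer_instance

-- ===== CLAIM (what is proved, stated in full; the proofs are below) =====
def Claim_equal_resolve_server_name_from_prefixed_tool_name_py : Prop := ∀ (prefixed_tool_name : String) (server_names : List String), Dom_resolve_server_name_from_prefixed_tool_name_py prefixed_tool_name server_names → Spec_resolve_server_name_from_prefixed_tool_name_py prefixed_tool_name server_names (resolve_server_name_from_prefixed_tool_name_py prefixed_tool_name server_names)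

-- ===== LEMMAS AND PROOFS =====

-- the two if-returns of A's loop body collapse to one disjunctive test
theorem pvLoopA_cons (p s : String) (rest : List String) :
    pvLoopA p (s :: rest) =
      if p == s || PySem.Chars.startswith p.toList (s.toList ++ ['_']) then some s
      else pvLoopA p rest := by
  by_cases h1 : p == s <;>
    by_cases h2 : PySem.Chars.startswith p.toList (s.toList ++ ['_']) <;>
      simp [pvLoopA, h1, h2]

theorem pvLoopA_mem (p : String) (l : List String) (z : String)
    (h : pvLoopA p l = some z) : z ∈ l := by
  induction l with
  | nil => simp [pvLoopA] at h
  | cons s rest ih =>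
      rw [pvLoopA_cons] at h
      by_cases hc : p == s || PySem.Chars.startswith p.toList (s.toList ++ ['_'])
      · simp [hc] at h; simp [h]
      · simp [hc] at h; exact List.mem_cons_of_mem _ (ih h)

-- inserting into a length-descending list keeps it length-descending
theorem pvPairwise_insertBy (x : String) (acc : List String)
    (h : acc.Pairwise (fun a b => PySem.Str.len b ≤ PySem.Str.len a)) :
    (PySem.List.insertBy (fun a b => decide (PySem.Str.len b < PySem.Str.len a)) x acc).Pairwise
      (fun a b => PySem.Str.len b ≤ PySem.Str.len a) := by
  induction acc with
  | nil => simp [PySem.List.insertBy]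
  | cons y t ih =>
      rw [List.pairwise_cons] at h
      obtain ⟨hy, ht⟩ := h
      by_cases hb : PySem.Str.len y < PySem.Str.len x
      · simp only [PySem.List.insertBy, hb, decide_true, if_pos]
        refine List.pairwise_cons.mpr ⟨?_, List.pairwise_cons.mpr ⟨hy, ht⟩⟩
        intro z hz
        rcases List.mem_cons.mp hz with rfl | hz
        · exact le_of_lt hb
        · exact le_trans (hy z hz) (le_of_lt hb)
      · simp only [PySem.List.insertBy, hb, decide_false, if_neg, Bool.false_eq_true,
          not_false_iff]
        refine List.pairwise_cons.mpr ⟨?_, ih ht⟩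
        intro z hz
        rcases (PySem.List.mem_insertBy _ x z t).mp hz with rfl | hz
        · omega
        · exact hy z hz

-- the key step: scanning after one insertion = one best-update step
theorem pvStep (p x : String) (acc : List String)
    (h : acc.Pairwise (fun a b => PySem.Str.len b ≤ PySem.Str.len a)) :
    pvLoopA p (PySem.List.insertBy (fun a b => decide (PySem.Str.len b < PySem.Str.len a)) x acc)
      = pvBestStep p (pvLoopA p acc) x := by
  induction acc with
  | nil =>
      simp only [PySem.List.insertBy]
      rw [pvLoopA_cons]
      unfold pvBestStep
      by_cases hm : p == x || PySem.Chars.startswith p.toList (x.toList ++ ['_']) <;>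
        simp [pvLoopA, hm]
  | cons y t ih =>
      rw [List.pairwise_cons] at h
      obtain ⟨hy, ht⟩ := h
      by_cases hb : PySem.Str.len y < PySem.Str.len x
      · -- x is inserted in front of y :: t
        simp only [PySem.List.insertBy, hb, decide_true, if_pos]
        rw [pvLoopA_cons]
        by_cases hm : p == x || PySem.Chars.startswith p.toList (x.toList ++ ['_'])
        · -- x matches; every element of y :: t is shorter, so the step picks x
          rw [if_pos hm]
          unfold pvBestStep
          rcases hz : pvLoopA p (y :: t) with _ | z
          · simp [hm]
          · have hzmem := pvLoopA_mem p (y :: t) z hz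
            have hzlen : PySem.Str.len z < PySem.Str.len x := by
              rcases List.mem_cons.mp hzmem with rfl | hzt
              · exact hb
              · exact lt_of_le_of_lt (hy z hzt) hb
            have hzl : z.length < x.length := by simpa using hzlen
            simp [hm]
            intro hle
            exact absurd hle (by omega)
        · rw [if_neg hm]
          unfold pvBestStep
          rcases pvLoopA p (y :: t) with _ | z <;> simp [hm]
      · -- x goes below y
        simp only [PySem.List.insertBy, hb, decide_false, Bool.false_eq_true, if_neg,
          not_false_iff]
        rw [pvLoopA_cons, pvLoopA_cons, ih ht]
        by_cases hmy : p == y || PySem.Chars.startswith p.toList (y.toList ++ ['_'])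
        · rw [if_pos hmy, if_pos hmy]
          unfold pvBestStep
          have hb' : ¬ y.length < x.length := by simpa using hb
          by_cases hm : p == x || PySem.Chars.startswith p.toList (x.toList ++ ['_']) <;>
            simp [hm]
          intro h
          exact absurd h hb'
        · rw [if_neg hmy, if_neg hmy]

-- scanning the insertion-sorted list = folding the best-update over the original list
theorem pvMain (p : String) (names : List String) :
    ∀ (acc : List String), acc.Pairwise (fun a b => PySem.Str.len b ≤ PySem.Str.len a) →
      pvLoopA p (names.foldl
          (fun acc x => PySem.List.insertBy (fun a b => decide (PySem.Str.len b < PySem.Str.len a)) x acc)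
          acc)
        = names.foldl (pvBestStep p) (pvLoopA p acc) := by
  induction names with
  | nil => intro acc _; rfl
  | cons x rest ih =>
      intro acc hacc
      simp only [List.foldl_cons]
      rw [ih _ (pvPairwise_insertBy x acc hacc), pvStep p x acc hacc]

-- ===== VERDICT (by name: the statement is the Claim_ definition above) =====
theorem resolve_server_name_from_prefixed_tool_name_py_spec : Claim_equal_resolve_server_name_from_prefixed_tool_name_py := by
  intro p names _
  unfold Spec_resolve_server_name_from_prefixed_tool_name_py
    resolve_server_name_from_prefixed_tool_name_py
    resolve_server_name_from_prefixed_tool_name_py_alt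
  rw [PySem.List.sorted_rev_eq_foldl_insertBy]
  exact pvMain p names [] (List.Pairwise.nil)
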